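-- pv_equiv track=rewrite | github.com/jakehoare/leetcode | python_1_to_1000/842_Split_Array_into_Fibonacci_Sequence.py | splitIntoFibonacci
-- ===== SOURCE A (Python) =====
-- def splitIntoFibonacci(S):
--     """
--     :type S: str
--     :rtype: List[int]
--     """
--     MAX_NUM = 2 ** 31 - 1
--
--     def helper(i, n1, n2):          # build sequence from S[i] onwards starting with n1 and n2
--
--         fib = [n1, n2]
--
--         while i < len(S):
--
--             next_num = fib[-1] + fib[-2]
--             if next_num > MAX_NUM:
--                 return []
--             next_str = str(next_num)
--             if S[i:i + len(next_str)] != next_str:  # next_str must match the next part of S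
--                 return []
--             fib.append(next_num)
--             i += len(next_str)
--
--         return fib
--
--     for len1 in range(1, (len(S) + 1) // 2):
--
--         if len1 > 1 and S[0] == "0":    # no leading zero unless zero
--             return []
--         n1 = int(S[:len1])
--         if n1 > MAX_NUM:
--             return []
--
--         len2 = 1
--         while len(S) - len1 - len2 >= max(len1, len2):
--
--             if len2 > 1 and S[len1] == "0": # no leading zero unless zero
--                 break
--             n2 = int(S[len1:len1 + len2])
--             if n2 > MAX_NUM:
--                 break
--
--             fibonacci = helper(len1 + len2, n1, n2)
--             if fibonacci:
--                 return fibonacci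
--             len2 += 1
--
--     return []
-- ===== SOURCE B (Python) =====
-- def splitIntoFibonacci(S):
--     """Recursive backtracking over positions: one dfs(start, path) with a forced
--     continuation once two numbers are placed, instead of A's nested index loops
--     plus a separate while-loop helper."""
--     MAX_NUM = 2 ** 31 - 1
--     n = len(S)
--
--     def dfs(start, path):
--         if start == n:
--             return path if len(path) >= 3 else None
--         if len(path) >= 2:
--             nxt = path[-1] + path[-2]
--             if nxt > MAX_NUM:
--                 return None
--             ns = str(nxt)
--             if S[start:start + len(ns)] != ns:
--                 return None
--             return dfs(start + len(ns), path + [nxt])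
--         # choose the length d of the next (first or second) number
--         for d in range(1, n - start + 1):
--             if not path:
--                 # the rest must hold at least two further numbers, each no shorter in digits
--                 if 2 * d >= n:
--                     break
--             elif n - start - d < max(start, d):
--                 # the rest must hold the sum, which has at least max(start, d) digits
--                 break
--             chunk = S[start:start + d]
--             if d > 1 and chunk[0] == "0":
--                 break
--             val = int(chunk)
--             if val > MAX_NUM:
--                 break
--             res = dfs(start + d, path + [val])
--             if res is not None:
--                 return res
--         return None
--
--     res = dfs(0, [])
--     return res if res is not None else []
-- ===== Notes on version B (the rewrite author's own statement) =====
-- stated objective: alternative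
-- what changed: A's two nested index loops (for len1, while len2) plus a separate while-loop helper that builds the tail are replaced by a single recursive backtracking dfs(start, path) over string positions that forces the next number once two are placed and accepts only at end-of-string with at least three numbers.
-- outside the precondition, e.g. on splitIntoFibonacci('11 23'): A returns [1, 1, 2, 3], B returns [1, 1, 2, 3]
import Mathlib
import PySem

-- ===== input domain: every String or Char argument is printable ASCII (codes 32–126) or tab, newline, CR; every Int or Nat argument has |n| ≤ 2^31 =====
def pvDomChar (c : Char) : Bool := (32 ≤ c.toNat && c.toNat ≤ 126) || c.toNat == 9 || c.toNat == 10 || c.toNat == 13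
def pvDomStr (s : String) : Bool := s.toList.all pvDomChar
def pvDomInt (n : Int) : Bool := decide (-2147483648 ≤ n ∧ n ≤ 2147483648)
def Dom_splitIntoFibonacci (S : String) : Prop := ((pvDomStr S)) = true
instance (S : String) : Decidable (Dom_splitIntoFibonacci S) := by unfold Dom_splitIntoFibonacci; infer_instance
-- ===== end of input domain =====

-- B re-implements A's nested loops + while-helper as one recursive backtracking dfs
-- over positions with a forced continuation; objective: alternative decomposition (no speed claim).

-- ===== PORT A =====

def pvMAX : Int := 2 ^ 31 - 1

-- termination helper for the while-loop port: str(n) is never empty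
theorem pvToCharsNeNil (m : Int) : PySem.Int.toChars m ≠ [] := by
  unfold PySem.Int.toChars
  split
  · simp
  · rw [Nat.toDigits_eq_if (by norm_num)]; split <;> simp

-- helper(i, n1, n2): the while loop, as recursion on cs.length - i; fib is the list A appends to
def pvHelperA (cs : List Char) (i : Nat) (fib : List Int) : List Int :=
  if h : i < cs.length then
    let next := PySem.List.pyGetD fib (-1) 0 + PySem.List.pyGetD fib (-2) 0
    if next > pvMAX then []
    else
      let ns := PySem.Int.toChars next
      if PySem.List.slice cs (some (i : Int)) (some ((i : Int) + (ns.length : Int))) ≠ ns then []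
      else pvHelperA cs (i + ns.length) (fib ++ [next])
  else fib
termination_by cs.length - i
decreasing_by
  have h2 := List.length_pos_iff.mpr
    (pvToCharsNeNil (PySem.List.pyGetD fib (-1) 0 + PySem.List.pyGetD fib (-2) 0))
  omega

-- the inner 'while len(S) - len1 - len2 >= max(len1, len2)' loop over len2 (break ⇒ none)
def pvInnerA (cs : List Char) (len1 : Nat) (n1 : Int) (len2 : Nat) : Option (List Int) :=
  if h : (cs.length : Int) - (len1 : Int) - (len2 : Int) ≥ max (len1 : Int) (len2 : Int) then
    if 1 < len2 ∧ (PySem.List.pyGet? cs (len1 : Int)).getD ' ' = '0' then none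
    else
      let n2 := (PySem.Int.ofChars? (PySem.List.slice cs (some (len1 : Int)) (some ((len1 : Int) + (len2 : Int))))).getD 0
      if n2 > pvMAX then none
      else
        let fib := pvHelperA cs (len1 + len2) [n1, n2]
        if fib ≠ [] then some fib else pvInnerA cs len1 n1 (len2 + 1)
  else none
termination_by cs.length + 1 - len2
decreasing_by omega

-- 'for len1 in range(1, (len(S) + 1) // 2)' with its early returns
def pvOuterA (cs : List Char) (len1 : Nat) : List Int :=
  if _h : len1 < (cs.length + 1) / 2 then
    if 1 < len1 ∧ (PySem.List.pyGet? cs (0 : Int)).getD ' ' = '0' then []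
    else
      let n1 := (PySem.Int.ofChars? (PySem.List.slice cs none (some (len1 : Int)))).getD 0
      if n1 > pvMAX then []
      else
        match pvInnerA cs len1 n1 1 with
        | some fib => fib
        | none => pvOuterA cs (len1 + 1)
  else []
termination_by (cs.length + 1) / 2 - len1
decreasing_by omega

def splitIntoFibonacci (S : String) : List Int := pvOuterA S.toList 1

-- ===== PORT B =====

-- dfs(start, path); the recursion-depth guard 'fuel' is unreachable from the entry fuel
mutual
def pvDfsB (cs : List Char) (fuel : Nat) (start : Nat) (path : List Int) : Option (List Int) :=
  if start = cs.length then (if 3 ≤ path.length then some path else none)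
  else
    match fuel with
    | 0 => none
    | fuel' + 1 =>
      if 2 ≤ path.length then
        let nxt := PySem.List.pyGetD path (-1) 0 + PySem.List.pyGetD path (-2) 0
        if nxt > pvMAX then none
        else
          let ns := PySem.Int.toChars nxt
          if PySem.List.slice cs (some (start : Int)) (some ((start : Int) + (ns.length : Int))) ≠ ns then none
          else pvDfsB cs fuel' (start + ns.length) (path ++ [nxt])
      else pvTryB cs fuel' start path 1
termination_by (fuel, 0)
decreasing_by
  all_goals exact Prod.Lex.left _ _ (by omega)

-- 'for d in range(1, n - start + 1)' with its breaks (break ⇒ none)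
def pvTryB (cs : List Char) (fuel : Nat) (start : Nat) (path : List Int) (d : Nat) : Option (List Int) :=
  -- chunk = S[start:start+d] and val = int(chunk) of Source B are written out in full below
  if hd : 1 ≤ d ∧ d ≤ cs.length - start then
    if path.isEmpty ∧ 2 * d ≥ cs.length then none
    else if ¬ path.isEmpty ∧ (cs.length : Int) - (start : Int) - (d : Int) < max (start : Int) (d : Int) then none
    else if 1 < d ∧ (PySem.List.pyGet? (PySem.List.slice cs (some (start : Int)) (some ((start : Int) + (d : Int)))) (0 : Int)).getD ' ' = '0' then none
    else if (PySem.Int.ofChars? (PySem.List.slice cs (some (start : Int)) (some ((start : Int) + (d : Int))))).getD 0 > pvMAX then none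
    else
      match pvDfsB cs fuel (start + d)
          (path ++ [(PySem.Int.ofChars? (PySem.List.slice cs (some (start : Int)) (some ((start : Int) + (d : Int))))).getD 0]) with
      | some r => some r
      | none => pvTryB cs fuel start path (d + 1)
  else none
termination_by (fuel, cs.length - start + 1 - d)
decreasing_by
  all_goals first
    | exact Prod.Lex.left _ _ (by omega)
    | exact Prod.Lex.right _ (by omega)
end

def splitIntoFibonacci_alt (S : String) : List Int :=
  (pvDfsB S.toList (S.toList.length + 2) 0 []).getD []

-- ===== PRECONDITION & SPEC =====
-- Pre_ excludes strings of length ≥ 3 containing a non-digit character: on nearly all of them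
-- A raises ValueError from int(); on rare whitespace layouts Python's whitespace-stripping int()
-- lets A return a value, and B (which parses the same way) returns the same value there.
def Pre_splitIntoFibonacci (S : String) : Prop :=
  S.toList.length ≤ 2 ∨ S.toList.all (fun c => PySem.Chars.isdigit c) = true
instance (S : String) : Decidable (Pre_splitIntoFibonacci S) := by
  unfold Pre_splitIntoFibonacci; infer_instance

def pvWitness_splitIntoFibonacci : String := "112"

def Spec_splitIntoFibonacci (S : String) (out : List Int) : Prop := out = splitIntoFibonacci_alt S
instance (S : String) (out : List Int) : Decidable (Spec_splitIntoFibonacci S out) := by unfold Spec_splitIntoFibonacci; infer_instance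

-- ===== CLAIM (what is proved, stated in full; the proofs are below) =====
def Claim_equal_splitIntoFibonacci : Prop := ∀ (S : String), Dom_splitIntoFibonacci S → Pre_splitIntoFibonacci S → Spec_splitIntoFibonacci S (splitIntoFibonacci S)

-- ===== LEMMAS AND PROOFS =====

-- the helper only ever appends: a non-[] result is at least as long as the accumulator
theorem pvHelperA_mono (cs : List Char) : ∀ i fib, pvHelperA cs i fib ≠ [] →
    fib.length ≤ (pvHelperA cs i fib).length := by
  intro i fib
  fun_induction pvHelperA with
  | case1 => simp_all
  | case2 => simp_all
  | case3 i fib h next hmax ns hsl ih =>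
    intro hne
    have := ih hne
    simp only [List.length_append, List.length_cons, List.length_nil] at this
    omega
  | case4 => simp

-- entered with i < n, a non-[] helper result made at least one step
theorem pvHelperA_grow (cs : List Char) (i : Nat) (fib : List Int) (hi : i < cs.length)
    (hne : pvHelperA cs i fib ≠ []) : fib.length + 1 ≤ (pvHelperA cs i fib).length := by
  fun_induction pvHelperA with
  | case1 => simp_all
  | case2 => simp_all
  | case3 i fib h next hmax ns hsl ih =>
    have := pvHelperA_mono cs (i + ns.length) (fib ++ [next]) hne
    simp only [List.length_append, List.length_cons, List.length_nil] at this
    omega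
  | case4 => omega

-- forced continuation: B's dfs with ≥ 2 numbers placed is A's helper
theorem pvForced (cs : List Char) : ∀ fuel i path, 2 ≤ path.length → i ≤ cs.length →
    cs.length ≤ i + fuel →
    pvDfsB cs fuel i path =
      if 3 ≤ (pvHelperA cs i path).length then some (pvHelperA cs i path) else none := by
  intro fuel
  induction fuel with
  | zero =>
    intro i path hp hi hf
    have hin : i = cs.length := by omega
    subst hin
    rw [pvDfsB, pvHelperA]
    simp
  | succ fuel ih =>
    intro i path hp hi hf
    by_cases hin : i = cs.length
    · subst hin
      rw [pvDfsB, pvHelperA]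
      simp
    · have hilt : i < cs.length := by omega
      rw [pvDfsB, pvHelperA]
      simp only [hin, if_false, dif_pos hilt, if_pos hp]
      set nxt := PySem.List.pyGetD path (-1) 0 + PySem.List.pyGetD path (-2) 0 with hnxt
      set L := (PySem.Int.toChars nxt).length with hL
      by_cases hmax : nxt > pvMAX
      · simp [hmax]
      · simp only [if_neg hmax]
        by_cases hsl : PySem.List.slice cs (some (i : Int)) (some ((i : Int) + (L : Int))) ≠
            PySem.Int.toChars nxt
        · simp [hsl]
        · simp only [if_neg hsl]
          rw [not_ne_iff] at hsl
          have hLpos : 1 ≤ L := List.length_pos_iff.mpr (pvToCharsNeNil nxt)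
          have hlen := congrArg List.length hsl
          have hcast : ((i : Int) + (L : Int)) = (((i + L : Nat)) : Int) := by push_cast; ring
          rw [PySem.List.length_slice, hcast, PySem.List.clampIdx_natCast,
            PySem.List.clampIdx_natCast, hL] at hlen
          exact ih (i + L) (path ++ [nxt]) (by simp; omega) (by omega) (by omega)

-- a found sequence is never []
theorem pvInnerA_some_ne_nil (cs : List Char) : ∀ len2 len1 n1 fib,
    pvInnerA cs len1 n1 len2 = some fib → fib ≠ [] := by
  intro len2 len1 n1
  fun_induction pvInnerA with
  | case1 => intro fib h; simp at h
  | case2 => intro fib h; simp at h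
  | case3 x h1 h2 n2 h3 fb hne => intro fib h; simp only [Option.some.injEq] at h; exact h ▸ hne
  | case4 x h1 h2 n2 h3 fb h4 ih => intro fib h; exact ih fib h
  | case5 => intro fib h; simp at h

-- chunk[0] is S[start] when the chunk is a nonempty in-range slice
theorem pvSliceHead (cs : List Char) (a b : Nat) (ha : a < cs.length) (hb : 1 ≤ b) :
    (PySem.List.pyGet? (PySem.List.slice cs (some (a : Int)) (some ((a : Int) + (b : Int)))) (0 : Int)).getD ' '
      = (PySem.List.pyGet? cs (a : Int)).getD ' ' := by
  rw [PySem.List.slice_natCast_add, PySem.List.pyGet?_zero, PySem.List.pyGet?_natCast]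
  rw [List.getElem?_take_of_lt (by omega), List.getElem?_drop, Nat.add_zero]

-- level 2: B's length loop with one number placed is A's inner while loop
theorem pvInner (cs : List Char) : ∀ len2 len1 n1 fuel, 1 ≤ len1 → 1 ≤ len2 →
    cs.length ≤ fuel →
    pvTryB cs fuel len1 [n1] len2 = pvInnerA cs len1 n1 len2 := by
  intro len2 len1 n1 fuel
  fun_induction pvInnerA with
  | case1 x hcond hzero =>
    intro hl1 hl2 hfuel
    have hmx1 := le_trans (le_max_left (len1 : Int) (x : Int)) hcond
    have hmx2 := le_trans (le_max_right (len1 : Int) (x : Int)) hcond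
    rw [pvTryB]
    rw [dif_pos (by constructor <;> omega)]
    rw [if_neg (by simp)]
    rw [if_neg (fun hc => absurd hc.2 (not_lt.mpr hcond))]
    rw [pvSliceHead cs len1 x (by omega) hl2]
    rw [if_pos hzero]
  | case2 x hcond hzero n2 hmax =>
    intro hl1 hl2 hfuel
    have hmx1 := le_trans (le_max_left (len1 : Int) (x : Int)) hcond
    have hmx2 := le_trans (le_max_right (len1 : Int) (x : Int)) hcond
    rw [pvTryB]
    rw [dif_pos (by constructor <;> omega)]
    rw [if_neg (by simp)]
    rw [if_neg (fun hc => absurd hc.2 (not_lt.mpr hcond))]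
    rw [pvSliceHead cs len1 x (by omega) hl2]
    rw [if_neg hzero]
    have hmax' : (PySem.Int.ofChars? (PySem.List.slice cs (some (len1 : Int)) (some ((len1 : Int) + (x : Int))))).getD 0 > pvMAX := hmax
    rw [if_pos hmax']
  | case3 x hcond hzero n2 hmax fib hne =>
    intro hl1 hl2 hfuel
    have hmx1 := le_trans (le_max_left (len1 : Int) (x : Int)) hcond
    have hmx2 := le_trans (le_max_right (len1 : Int) (x : Int)) hcond
    rw [pvTryB]
    rw [dif_pos (by constructor <;> omega)]
    rw [if_neg (by simp)]
    rw [if_neg (fun hc => absurd hc.2 (not_lt.mpr hcond))]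
    rw [pvSliceHead cs len1 x (by omega) hl2]
    rw [if_neg hzero]
    have hmax' : ¬ (PySem.Int.ofChars? (PySem.List.slice cs (some (len1 : Int)) (some ((len1 : Int) + (x : Int))))).getD 0 > pvMAX := hmax
    rw [if_neg hmax']
    have happ : ([n1] ++ [(PySem.Int.ofChars? (PySem.List.slice cs (some (len1 : Int)) (some ((len1 : Int) + (x : Int))))).getD 0]) = [n1, (PySem.Int.ofChars? (PySem.List.slice cs (some (len1 : Int)) (some ((len1 : Int) + (x : Int))))).getD 0] := rfl
    rw [happ]
    rw [pvForced cs fuel (len1 + x) [n1, (PySem.Int.ofChars? (PySem.List.slice cs (some (len1 : Int)) (some ((len1 : Int) + (x : Int))))).getD 0] (by simp) (by omega) (by omega)]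
    have hne' : pvHelperA cs (len1 + x) [n1, (PySem.Int.ofChars? (PySem.List.slice cs (some (len1 : Int)) (some ((len1 : Int) + (x : Int))))).getD 0] ≠ [] := hne
    have h3 := pvHelperA_grow cs (len1 + x) [n1, (PySem.Int.ofChars? (PySem.List.slice cs (some (len1 : Int)) (some ((len1 : Int) + (x : Int))))).getD 0] (by omega) hne'
    simp only [List.length_cons, List.length_nil] at h3
    rw [if_pos (by omega)]
  | case4 x hcond hzero n2 hmax fib hnil ih =>
    intro hl1 hl2 hfuel
    have hmx1 := le_trans (le_max_left (len1 : Int) (x : Int)) hcond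
    have hmx2 := le_trans (le_max_right (len1 : Int) (x : Int)) hcond
    rw [pvTryB]
    rw [dif_pos (by constructor <;> omega)]
    rw [if_neg (by simp)]
    rw [if_neg (fun hc => absurd hc.2 (not_lt.mpr hcond))]
    rw [pvSliceHead cs len1 x (by omega) hl2]
    rw [if_neg hzero]
    have hmax' : ¬ (PySem.Int.ofChars? (PySem.List.slice cs (some (len1 : Int)) (some ((len1 : Int) + (x : Int))))).getD 0 > pvMAX := hmax
    rw [if_neg hmax']
    have happ : ([n1] ++ [(PySem.Int.ofChars? (PySem.List.slice cs (some (len1 : Int)) (some ((len1 : Int) + (x : Int))))).getD 0]) = [n1, (PySem.Int.ofChars? (PySem.List.slice cs (some (len1 : Int)) (some ((len1 : Int) + (x : Int))))).getD 0] := rfl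
    rw [happ]
    rw [pvForced cs fuel (len1 + x) [n1, (PySem.Int.ofChars? (PySem.List.slice cs (some (len1 : Int)) (some ((len1 : Int) + (x : Int))))).getD 0] (by simp) (by omega) (by omega)]
    have hnil' : pvHelperA cs (len1 + x) [n1, (PySem.Int.ofChars? (PySem.List.slice cs (some (len1 : Int)) (some ((len1 : Int) + (x : Int))))).getD 0] = [] := not_ne_iff.mp hnil
    rw [hnil']
    rw [if_neg (by simp)]
    exact ih hl1 (by omega) hfuel
  | case5 x hcond =>
    intro hl1 hl2 hfuel
    rw [pvTryB]
    by_cases hx : 1 ≤ x ∧ x ≤ cs.length - len1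
    · rw [dif_pos hx]
      rw [if_neg (by simp)]
      have hpos : ¬([n1].isEmpty = true) ∧ (cs.length : Int) - (len1 : Int) - (x : Int) < max (len1 : Int) (x : Int) :=
        ⟨by simp, lt_of_not_ge hcond⟩
      rw [if_pos hpos]
    · rw [dif_neg hx]

-- level 1 zero-check: chunk[0] is S[0] for the prefix chunk
theorem pvSliceHead' (cs : List Char) (b : Nat) (hn : 0 < cs.length) (hb : 1 ≤ b) :
    (PySem.List.pyGet? (PySem.List.slice cs none (some (b : Int))) (0 : Int)).getD ' '
      = (PySem.List.pyGet? cs (0 : Int)).getD ' ' := by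
  rw [PySem.List.slice_to_natCast, PySem.List.pyGet?_zero, PySem.List.pyGet?_zero]
  rw [List.getElem?_take_of_lt (by omega)]

-- level 1: B's length loop with nothing placed is A's for loop over len1
theorem pvOuter (cs : List Char) : ∀ len1 fuel, 1 ≤ len1 → cs.length ≤ fuel →
    pvTryB cs (fuel + 1) 0 [] len1 =
      if pvOuterA cs len1 = [] then none else some (pvOuterA cs len1) := by
  intro len1 fuel
  fun_induction pvOuterA with
  | case1 len1 h hzero =>
    intro hl1 hfuel
    rw [pvTryB]
    rw [dif_pos (by constructor <;> omega)]
    rw [if_neg (by rintro ⟨-, h2⟩; omega)]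
    rw [if_neg (by rintro ⟨hh, -⟩; exact hh rfl)]
    simp only [Nat.cast_zero, zero_add, PySem.List.slice_zero_start, List.nil_append]
    rw [pvSliceHead' cs len1 (by omega) hl1]
    rw [if_pos hzero]
    simp
  | case2 len1 h hzero n1 hmax =>
    intro hl1 hfuel
    rw [pvTryB]
    rw [dif_pos (by constructor <;> omega)]
    rw [if_neg (by rintro ⟨-, h2⟩; omega)]
    rw [if_neg (by rintro ⟨hh, -⟩; exact hh rfl)]
    simp only [Nat.cast_zero, zero_add, PySem.List.slice_zero_start, List.nil_append]
    rw [pvSliceHead' cs len1 (by omega) hl1]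
    rw [if_neg hzero]
    have hmax' : (PySem.Int.ofChars? (PySem.List.slice cs none (some (len1 : Int)))).getD 0 > pvMAX := hmax
    rw [if_pos hmax']
    simp
  | case3 len1 h hzero n1 hmax fib hsome =>
    intro hl1 hfuel
    rw [pvTryB]
    rw [dif_pos (by constructor <;> omega)]
    rw [if_neg (by rintro ⟨-, h2⟩; omega)]
    rw [if_neg (by rintro ⟨hh, -⟩; exact hh rfl)]
    simp only [Nat.cast_zero, zero_add, PySem.List.slice_zero_start, List.nil_append]
    rw [pvSliceHead' cs len1 (by omega) hl1]
    rw [if_neg hzero]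
    have hmax' : ¬ (PySem.Int.ofChars? (PySem.List.slice cs none (some (len1 : Int)))).getD 0 > pvMAX := hmax
    rw [if_neg hmax']
    rw [pvDfsB]
    rw [if_neg (by omega)]
    have hsome' : pvInnerA cs len1 ((PySem.Int.ofChars? (PySem.List.slice cs none (some (len1 : Int)))).getD 0) 1 = some fib := hsome
    simp only [List.length_cons, List.length_nil]
    rw [if_neg (by omega)]
    rw [pvInner cs 1 len1 ((PySem.Int.ofChars? (PySem.List.slice cs none (some (len1 : Int)))).getD 0) fuel hl1 (le_refl 1) hfuel]
    rw [hsome']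
    rw [if_neg (pvInnerA_some_ne_nil cs 1 len1 ((PySem.Int.ofChars? (PySem.List.slice cs none (some (len1 : Int)))).getD 0) fib hsome')]
  | case4 len1 h hzero n1 hmax hnone ih =>
    intro hl1 hfuel
    rw [pvTryB]
    rw [dif_pos (by constructor <;> omega)]
    rw [if_neg (by rintro ⟨-, h2⟩; omega)]
    rw [if_neg (by rintro ⟨hh, -⟩; exact hh rfl)]
    simp only [Nat.cast_zero, zero_add, PySem.List.slice_zero_start, List.nil_append]
    rw [pvSliceHead' cs len1 (by omega) hl1]
    rw [if_neg hzero]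
    have hmax' : ¬ (PySem.Int.ofChars? (PySem.List.slice cs none (some (len1 : Int)))).getD 0 > pvMAX := hmax
    rw [if_neg hmax']
    rw [pvDfsB]
    rw [if_neg (by omega)]
    have hnone' : pvInnerA cs len1 ((PySem.Int.ofChars? (PySem.List.slice cs none (some (len1 : Int)))).getD 0) 1 = none := hnone
    simp only [List.length_cons, List.length_nil]
    rw [if_neg (by omega)]
    rw [pvInner cs 1 len1 ((PySem.Int.ofChars? (PySem.List.slice cs none (some (len1 : Int)))).getD 0) fuel hl1 (le_refl 1) hfuel]
    rw [hnone']
    exact ih (by omega) hfuel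
  | case5 len1 h =>
    intro hl1 hfuel
    rw [pvTryB]
    by_cases hx : 1 ≤ len1 ∧ len1 ≤ cs.length - 0
    · rw [dif_pos hx]
      rw [if_pos (⟨rfl, by omega⟩ : ([] : List Int).isEmpty = true ∧ 2 * len1 ≥ cs.length)]
      simp
    · rw [dif_neg hx]
      simp

-- ===== VERDICT (by name: the statement is the Claim_ definition above) =====
theorem splitIntoFibonacci_spec : Claim_equal_splitIntoFibonacci := by
  intro S _ _
  unfold Spec_splitIntoFibonacci splitIntoFibonacci splitIntoFibonacci_alt
  rw [pvDfsB]
  by_cases h0 : (0 : Nat) = S.toList.length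
  · rw [if_pos h0]
    rw [pvOuterA]
    rw [dif_neg (by omega)]
    simp
  · rw [if_neg h0]
    simp only [List.length_nil]
    rw [if_neg (by omega)]
    rw [pvOuter S.toList 1 S.toList.length (le_refl 1) (le_refl _)]
    by_cases hnil : pvOuterA S.toList 1 = []
    · rw [if_pos hnil, hnil]; rfl
    · rw [if_neg hnil]; rfl
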